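-- pv_equiv track=rewrite | github.com/andydailq/pythonstuff | functions/similarity.py | find_best_substrand
-- ===== SOURCE A (Python) =====
-- def search_sequence(dna_to_match, subsequence):
--     """
--     This function takes in two DNA sequences, and calculates
--     the number of spots at which the two sequences have the same
--     base pairs.
--     >>> search_sequence("GATC", "AATC")
--     3
--     >>> search_sequence("AGC", "TAG")
--     0
--     >>> search_sequence("ac","AC")
--     2
--     >>> search_sequence("TcGaC","GGaCT")
--     0
--     >>> search_sequence("tcAAtgGcC", "TGaATGatc")
--     6
--     """
--     count = 0
--     for i in range(len(dna_to_match)):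
--         if dna_to_match[i].upper() == subsequence[i].upper():
--             count += 1
--     return count
--
-- def find_best_substrand(dna_to_match, dna_to_search):
--     """
--     This function takes in two DNA strands, one to search through and one
--     for which you are trying to find a match. The function returns the closest
--     match to the target sequence in the search sequence based on the counter
--     value, the higher the value, the closer the match is.
--     >>> find_best_substrand("TCATA","ATGCCTGATA")
--     'TGATA'
--     >>> find_best_substrand("", "ATGCCTGATA")
--     ''
--     >>> find_best_substrand("tca","TCg")
--     'TCG'
--     >>> find_best_substrand("ACT","AGTCCGT")
--     'AGT'
--     >>> find_best_substrand("t","AGCCG")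
--     ''
--     """
--     matchlength = len(dna_to_match)
--     if matchlength == 0:
--         return ''
--     max = 0
--     closest_match = ''
--     for i in range(len(dna_to_search) - matchlength + 1):
--         current_substring = dna_to_search[i:i + matchlength].upper()
--         counter = search_sequence(dna_to_match, current_substring)
--         if counter > max:
--             closest_match = current_substring
--             max = counter
--     return closest_match
-- ===== SOURCE B (Python) =====
-- def _bisect_left(a, x, lo, hi):
--     while lo < hi:
--         mid = (lo + hi) // 2
--         if a[mid] < x:
--             lo = mid + 1
--         else:
--             hi = mid
--     return lo
--
-- def find_best_substrand(dna_to_match, dna_to_search):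
--     m = len(dna_to_match)
--     if m == 0:
--         return ''
--     s = dna_to_search.upper()
--     t = dna_to_match.upper()
--     nwin = len(s) - m + 1
--     if nwin <= 0:
--         return ''
--     # index the search strand: sorted positions of every character
--     positions = {}
--     for j, c in enumerate(s):
--         positions.setdefault(c, []).append(j)
--     # cross-correlate: every matching (i, j) pair votes for window j - i;
--     # only positions j in [i, i + nwin) can vote, so clip with binary search
--     score = [0] * nwin
--     for i, c in enumerate(t):
--         lst = positions.get(c, [])
--         lo = _bisect_left(lst, i, 0, len(lst))
--         hi = _bisect_left(lst, i + nwin, lo, len(lst))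
--         for j in lst[lo:hi]:
--             score[j - i] += 1
--     best = 0
--     best_k = -1
--     for k in range(nwin):
--         if score[k] > best:
--             best = score[k]
--             best_k = k
--     if best_k < 0:
--         return ''
--     return s[best_k:best_k + m]
-- ===== Notes on version B (the rewrite author's own statement) =====
-- stated objective: alternative
-- what changed: Instead of re-scanning and uppercasing each length-m window and counting matches per window, B uppercases both strands once, builds a per-character sorted positions index of the search strand, and lets every matching character pair (i, j) with j binary-search-clipped to the band [i, i+nwin) increment a per-window score array at offset j-i (band-limited cross-correlation), then picks the first strictly-maximal positive score.
import Mathlib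
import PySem

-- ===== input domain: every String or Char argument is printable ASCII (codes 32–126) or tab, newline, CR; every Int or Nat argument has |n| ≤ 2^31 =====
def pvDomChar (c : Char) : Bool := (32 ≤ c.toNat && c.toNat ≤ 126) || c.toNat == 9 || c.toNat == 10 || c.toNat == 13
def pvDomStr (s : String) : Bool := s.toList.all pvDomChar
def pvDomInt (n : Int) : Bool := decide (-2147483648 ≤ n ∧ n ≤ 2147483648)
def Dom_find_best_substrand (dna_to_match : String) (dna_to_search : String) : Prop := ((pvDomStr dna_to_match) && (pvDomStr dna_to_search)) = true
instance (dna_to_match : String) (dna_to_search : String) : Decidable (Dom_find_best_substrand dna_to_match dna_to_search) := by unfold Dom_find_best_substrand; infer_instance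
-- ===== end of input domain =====

-- B replaces A's per-window rescan (slice + uppercase + count per window) by a per-character sorted positions
-- index of the search strand and a band-limited cross-correlation score array (each matching in-band character
-- pair, clipped by binary search, votes for its window offset); objective: alternative algorithm, same result.

-- ===== PORT A =====
-- helper: Python's search_sequence; the char accesses are ported with pyGetD — at every call site of A the
-- indices are in range (the window slice has exactly dna_to_match's length), so the default is never consulted.
def search_sequence (dna_to_match : List Char) (subsequence : List Char) : Int :=
  (PySem.List.pyRange 0 (dna_to_match.length : Int) 1).foldl
    (fun count i =>
      if PySem.Chars.upperChar (PySem.List.pyGetD dna_to_match i ' ')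
           == PySem.Chars.upperChar (PySem.List.pyGetD subsequence i ' ')
      then count + 1 else count) 0

def find_best_substrand (dna_to_match : String) (dna_to_search : String) : String :=
  let matchlength : Int := (dna_to_match.toList.length : Int)
  if matchlength == 0 then "" else
  let res :=
    (PySem.List.pyRange 0 ((dna_to_search.toList.length : Int) - matchlength + 1) 1).foldl
      (fun st i =>
        let current_substring :=
          PySem.Chars.upper (PySem.List.slice dna_to_search.toList (some i) (some (i + matchlength)))
        let counter := search_sequence dna_to_match.toList current_substring
        if counter > st.1 then (counter, current_substring) else st)
      ((0 : Int), ([] : List Char))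
  String.ofList res.2

-- ===== PORT B =====
-- B-side helper: port of Source B's _bisect_left (the while loop is recursion on hi - lo;
-- Python's (lo + hi) // 2 is PySem.Int.floordiv)
def _bisect_left (a : List Int) (x : Int) (lo hi : Int) : Int :=
  if h : lo < hi then
    if PySem.List.pyGetD a (PySem.Int.floordiv (lo + hi) 2) 0 < x
    then _bisect_left a x (PySem.Int.floordiv (lo + hi) 2 + 1) hi
    else _bisect_left a x lo (PySem.Int.floordiv (lo + hi) 2)
  else lo
termination_by (hi - lo).toNat
decreasing_by
  · have hb := PySem.Int.floordiv_two_mid_bounds (le_of_lt h)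
    omega
  · have hlt : PySem.Int.floordiv (lo + hi) 2 < hi := by
      rw [PySem.Int.floordiv_lt_iff_lt_mul (by omega)]
      omega
    omega

def find_best_substrand_alt (dna_to_match : String) (dna_to_search : String) : String :=
  let m : Int := (dna_to_match.toList.length : Int)
  if m == 0 then "" else
  let s : List Char := PySem.Chars.upper dna_to_search.toList
  let t : List Char := PySem.Chars.upper dna_to_match.toList
  let nwin : Int := (s.length : Int) - m + 1
  if nwin ≤ 0 then "" else
  -- positions.setdefault(c, []).append(j)  ==  modify c [] (· ++ [j])
  let positions : PySem.Dict Char (List Int) :=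
    (PySem.List.enumerate s).foldl
      (fun d p => d.modify p.2 [] (fun l => l ++ [p.1])) PySem.Dict.empty
  let score : List Int :=
    (PySem.List.enumerate t).foldl
      (fun sc p =>
        let lst := positions.getD p.2 []
        let lo := _bisect_left lst p.1 0 (lst.length : Int)
        let hi := _bisect_left lst (p.1 + nwin) lo (lst.length : Int)
        (PySem.List.slice lst (some lo) (some hi)).foldl
          (fun sc j => PySem.List.pySetD sc (j - p.1) (PySem.List.pyGetD sc (j - p.1) 0 + 1)) sc)
      (List.replicate nwin.toNat 0)
  let best :=
    (PySem.List.pyRange 0 nwin 1).foldl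
      (fun st k =>
        if PySem.List.pyGetD score k 0 > st.1 then (PySem.List.pyGetD score k 0, k) else st)
      ((0 : Int), (-1 : Int))
  if best.2 < 0 then "" else
  String.ofList (PySem.List.slice s (some best.2) (some (best.2 + m)))

-- ===== PRECONDITION & SPEC =====
def Spec_find_best_substrand (dna_to_match : String) (dna_to_search : String) (out : String) : Prop := out = find_best_substrand_alt dna_to_match dna_to_search
instance (dna_to_match : String) (dna_to_search : String) (out : String) : Decidable (Spec_find_best_substrand dna_to_match dna_to_search out) := by unfold Spec_find_best_substrand; infer_instance

-- ===== CLAIM (what is proved, stated in full; the proofs are below) =====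
def Claim_equal_find_best_substrand : Prop := ∀ (dna_to_match : String) (dna_to_search : String), Dom_find_best_substrand dna_to_match dna_to_search → Spec_find_best_substrand dna_to_match dna_to_search (find_best_substrand dna_to_match dna_to_search)

-- ===== LEMMAS AND PROOFS =====

-- uppercasing is idempotent on Char
theorem pvUpperChar_idem (c : Char) :
    PySem.Chars.upperChar (PySem.Chars.upperChar c) = PySem.Chars.upperChar c := by
  have hle : ∀ a b : Char, (a ≤ b) ↔ a.toNat ≤ b.toNat := fun a b => ge_iff_le
  have ha : 'a'.toNat = 97 := by decide
  have hz : 'z'.toNat = 122 := by decide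
  unfold PySem.Chars.upperChar PySem.Chars.islower
  split_ifs with h1 h2
  · exfalso
    simp only [Bool.and_eq_true, decide_eq_true_eq, hle, Char.toNat_ofNat, ha, hz] at h1 h2
    have hval : (c.toNat - 32).isValidChar := by left; omega
    rw [if_pos hval] at h2
    omega
  · rfl
  · simp_all

-- uppercasing commutes with slicing
theorem pvUpper_slice (xs : List Char) (a? b? : Option Int) :
    PySem.Chars.upper (PySem.List.slice xs a? b?) = PySem.List.slice (PySem.Chars.upper xs) a? b? := by
  simp [PySem.List.slice, PySem.Chars.upper, List.map_take, List.map_drop]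

-- getD through Chars.upper at an in-range index
theorem pvUpper_getD (xs : List Char) (i : Nat) (hi : i < xs.length) :
    (PySem.Chars.upper xs).getD i ' ' = PySem.Chars.upperChar (xs.getD i ' ') := by
  have hi' : i < (PySem.Chars.upper xs).length := by simpa [PySem.Chars.upper] using hi
  rw [List.getD_eq_getElem _ _ hi', List.getD_eq_getElem _ _ hi]
  simp [PySem.Chars.upper]

-- A's helper counts positions where the uppercased characters agree
theorem pvSearch_eq_countP (tR cur : List Char) :
    search_sequence tR cur =
      ((List.range tR.length).countP
        (fun i => PySem.Chars.upperChar (tR.getD i ' ')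
               == PySem.Chars.upperChar (cur.getD i ' ')) : Int) := by
  unfold search_sequence
  rw [PySem.List.pyRange_zero_nat, List.foldl_map, PySem.List.foldl_if_add_one]
  simp

-- character of an uppercased window
theorem pvWindow_getD (sR : List Char) (k i m : Nat) (him : i < m) (hkm : k + m ≤ sR.length) :
    (PySem.Chars.upper (PySem.List.slice sR (some (k : Int)) (some ((k : Int) + (m : Int))))).getD i ' '
      = PySem.Chars.upperChar (sR.getD (k + i) ' ') := by
  rw [PySem.List.slice_natCast_add]
  have hlen : (((sR.drop k).take m)).length = m := by
    simp [List.length_take, List.length_drop]; omega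
  have hi : i < (PySem.Chars.upper ((sR.drop k).take m)).length := by
    simp [PySem.Chars.upper]; omega
  rw [List.getD_eq_getElem _ _ hi]
  have hki : k + i < sR.length := by omega
  rw [List.getD_eq_getElem _ _ hki]
  simp [PySem.Chars.upper, List.getElem_take, List.getElem_drop]

-- countP of a predicate pinned to one value, over a Nodup list
theorem pvCountP_pin (l : List Nat) (hl : l.Nodup) (q : Nat → Bool) (w : Nat) :
    l.countP (fun j => q j && (j == w)) = if w ∈ l ∧ q w then 1 else 0 := by
  have h1 : l.countP (fun j => q j && (j == w)) = (l.filter q).count w := by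
    rw [List.count, List.countP_filter]
    apply List.countP_congr
    intro x _
    simp [Bool.and_comm]
  rw [h1]
  by_cases h : w ∈ l ∧ q w
  · rw [if_pos h]
    exact List.count_eq_one_of_mem (hl.filter q) (List.mem_filter.mpr ⟨h.1, h.2⟩)
  · rw [if_neg h]
    rw [List.count_eq_zero]
    intro hmem
    exact h ⟨(List.mem_filter.mp hmem).1, (List.mem_filter.mp hmem).2⟩

-- the positions dict built by B lists, per character, the indices where it occurs
theorem pvPositions_getD (sU : List Char) (c : Char) :
    ((PySem.List.enumerate sU).foldl
        (fun d p => d.modify p.2 [] (fun l => l ++ [p.1])) PySem.Dict.empty).getD c []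
      = ((PySem.List.enumerate sU).filter (fun p => p.2 == c)).map (fun x => x.1) := by
  have h : (PySem.List.enumerate sU).foldl
        (fun d p => d.modify p.2 [] (fun l => l ++ [p.1])) PySem.Dict.empty
      = (((PySem.List.enumerate sU).map (fun p => (p.2, p.1))).foldl
          (fun d q => d.modify q.1 [] (fun l => l ++ [q.2])) PySem.Dict.empty) := by
    rw [List.foldl_map]
  rw [h, PySem.Dict.getD_foldl_modify_append, List.filter_map]
  simp [Function.comp_def]

-- how often one index occurs in a character's position list
theorem pvPositions_count (sU : List Char) (c : Char) (w : Nat) (hw : w < sU.length) :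
    (((PySem.List.enumerate sU).filter (fun p => p.2 == c)).map (fun x => x.1)).count ((w : Nat) : Int)
      = if sU.getD w ' ' == c then 1 else 0 := by
  rw [List.count, List.countP_map, List.countP_filter]
  rw [PySem.List.enumerate_eq_map_pyRange sU ' ', List.countP_map]
  simp only [PySem.List.len_eq]
  rw [PySem.List.pyRange_zero_nat, List.countP_map]
  rw [List.countP_congr (q := fun j : Nat => (sU.getD j ' ' == c) && (j == w)) ?_]
  · rw [pvCountP_pin _ (List.nodup_range) _ w]
    simp [hw]
  · intro j hj
    simp only [List.mem_range] at hj
    simp [Function.comp, Bool.and_comm, PySem.List.pyGetD_natCast]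

-- binary-search helper: what _bisect_left returns on a sorted list
theorem pvBisect_spec (a : List Int) (x : Int) (lo hi : Int)
    (hs : a.Pairwise (· < ·)) (h0 : 0 ≤ lo) (hlh : lo ≤ hi) (hhl : hi ≤ a.length) :
    lo ≤ _bisect_left a x lo hi ∧ _bisect_left a x lo hi ≤ hi
    ∧ (∀ q : Nat, lo ≤ (q : Int) → (q : Int) < _bisect_left a x lo hi → a.getD q 0 < x)
    ∧ (∀ q : Nat, _bisect_left a x lo hi ≤ (q : Int) → (q : Int) < hi → x ≤ a.getD q 0) := by
  have hmono : ∀ p q : Nat, p ≤ q → q < a.length → a.getD p 0 ≤ a.getD q 0 := by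
    intro p q hpq hq
    rcases Nat.lt_or_ge p q with h | h
    · rw [List.getD_eq_getElem _ _ (by omega), List.getD_eq_getElem _ _ hq]
      exact le_of_lt (List.pairwise_iff_getElem.mp hs p q (by omega) hq h)
    · have : p = q := by omega
      rw [this]
  revert h0 hlh hhl
  induction lo, hi using _bisect_left.induct a x with
  | case1 lo hi h hmid ih =>
    intro h0 hlh hhl
    have hb := PySem.Int.floordiv_two_mid_bounds (le_of_lt h)
    have hltm : (PySem.Int.floordiv (lo + hi) 2) < hi := by
      have : PySem.Int.floordiv (lo + hi) 2 < hi := by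
        rw [PySem.Int.floordiv_lt_iff_lt_mul (by omega)]; omega
      omega
    obtain ⟨i1, i2, i3, i4⟩ := ih (by omega) (by omega) (by omega)
    rw [_bisect_left, dif_pos h, if_pos hmid]
    refine ⟨by omega, i2, ?_, i4⟩
    intro q hq1 hq2
    rcases Int.lt_or_le (q : Int) ((PySem.Int.floordiv (lo + hi) 2) + 1) with hcase | hcase
    · have hqm : q ≤ (PySem.Int.floordiv (lo + hi) 2).toNat := by omega
      have hmidlen : (PySem.Int.floordiv (lo + hi) 2).toNat < a.length := by omega
      have := hmono q (PySem.Int.floordiv (lo + hi) 2).toNat hqm hmidlen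
      have hmid' : PySem.List.pyGetD a (PySem.Int.floordiv (lo + hi) 2) 0
          = a.getD (PySem.Int.floordiv (lo + hi) 2).toNat 0 := by
        rw [List.getD_eq_getElem _ _ (by omega)]
        exact PySem.List.pyGetD_eq_getElem a 0 (by omega) (by omega)
      omega
    · exact i3 q hcase hq2
  | case2 lo hi h hmid ih =>
    intro h0 hlh hhl
    have hb := PySem.Int.floordiv_two_mid_bounds (le_of_lt h)
    have hltm : (PySem.Int.floordiv (lo + hi) 2) < hi := by
      have : PySem.Int.floordiv (lo + hi) 2 < hi := by
        rw [PySem.Int.floordiv_lt_iff_lt_mul (by omega)]; omega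
      omega
    obtain ⟨i1, i2, i3, i4⟩ := ih (by omega) (by omega) (by omega)
    rw [_bisect_left, dif_pos h, if_neg hmid]
    refine ⟨i1, by omega, i3, ?_⟩
    intro q hq1 hq2
    rcases Int.lt_or_le (q : Int) (PySem.Int.floordiv (lo + hi) 2) with hcase | hcase
    · exact i4 q hq1 hcase
    · have hqlen : q < a.length := by omega
      have := hmono (PySem.Int.floordiv (lo + hi) 2).toNat q (by omega) hqlen
      have hmid' : PySem.List.pyGetD a (PySem.Int.floordiv (lo + hi) 2) 0
          = a.getD (PySem.Int.floordiv (lo + hi) 2).toNat 0 := by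
        rw [List.getD_eq_getElem _ _ (by omega)]
        exact PySem.List.pyGetD_eq_getElem a 0 (by omega) (by omega)
      omega
  | case3 lo hi h =>
    intro h0 hlh hhl
    rw [_bisect_left, dif_neg h]
    exact ⟨le_refl _, by omega, fun q h1 h2 => by omega, fun q h1 h2 => by omega⟩

-- inner scatter loop: adds 1 at offset j - i for every in-band j
theorem pvInner2 (i : Int) (L : Nat) (js' : List Int) (sc : List Int) (hL : sc.length = L)
    (hband : ∀ j ∈ js', 0 ≤ j - i ∧ j - i < (L : Int)) :
    ((js'.foldl (fun sc j =>
        PySem.List.pySetD sc (j - i) (PySem.List.pyGetD sc (j - i) 0 + 1)) sc).length = sc.length)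
    ∧ ∀ k : Nat, k < sc.length →
        (js'.foldl (fun sc j =>
            PySem.List.pySetD sc (j - i) (PySem.List.pyGetD sc (j - i) 0 + 1)) sc).getD k 0
          = sc.getD k 0 + (js'.count ((k : Int) + i) : Int) := by
  induction js' generalizing sc with
  | nil => simp
  | cons j js ih =>
    simp only [List.foldl_cons]
    have hg := hband j List.mem_cons_self
    set sc' := PySem.List.pySetD sc (j - i) (PySem.List.pyGetD sc (j - i) 0 + 1) with hsc'
    have hlen' : sc'.length = sc.length := by
      rw [hsc', PySem.List.pySetD_of_nonneg _ _ hg.1, List.length_set]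
    obtain ⟨ihl, ihe⟩ := ih sc' (by omega) (fun x hx => hband x (List.mem_cons_of_mem _ hx))
    refine ⟨by rw [ihl, hlen'], ?_⟩
    intro k hk
    rw [ihe k (by omega)]
    have hget : sc'.getD k 0 = sc.getD k 0 + (if j = (k : Int) + i then 1 else 0) := by
      rw [hsc', PySem.List.pySetD_of_nonneg _ _ hg.1]
      by_cases hjk : j = (k : Int) + i
      · have hji : j - i = ((k : Nat) : Int) := by omega
        rw [if_pos hjk, hji, Int.toNat_natCast]
        rw [List.getD_eq_getElem?_getD, List.getElem?_set_self hk, PySem.List.pyGetD_natCast]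
        simp [List.getD_eq_getElem?_getD]
      · have hm : (j - i).toNat ≠ k := by omega
        rw [if_neg hjk]
        rw [List.getD_eq_getElem?_getD, List.getElem?_set_ne hm, ← List.getD_eq_getElem?_getD]
        simp
    rw [hget]
    have hcnt : (j :: js).count ((k : Int) + i)
        = js.count ((k : Int) + i) + (if j = (k : Int) + i then 1 else 0) := by
      rw [List.count_cons]
      by_cases h : j = (k : Int) + i
      · simp [h]
      · simp [h]
    rw [hcnt]
    push_cast
    ring

-- the clipped slice: in-band bounds, and clipping preserves the count of any in-band value
theorem pvClip (js : List Int) (i nwin : Int) (hs : js.Pairwise (· < ·)) (hnw : 0 < nwin) :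
    (∀ j ∈ PySem.List.slice js (some (_bisect_left js i 0 (js.length : Int)))
            (some (_bisect_left js (i + nwin) (_bisect_left js i 0 (js.length : Int)) (js.length : Int))),
        0 ≤ j - i ∧ j - i < nwin)
    ∧ ∀ k : Nat, (k : Int) < nwin →
        (PySem.List.slice js (some (_bisect_left js i 0 (js.length : Int)))
            (some (_bisect_left js (i + nwin) (_bisect_left js i 0 (js.length : Int)) (js.length : Int)))).count ((k : Int) + i)
          = js.count ((k : Int) + i) := by
  obtain ⟨s10, s11, s12, s13⟩ := pvBisect_spec js i 0 (js.length : Int) hs le_rfl (by omega) le_rfl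
  set lo := _bisect_left js i 0 (js.length : Int) with hlo
  obtain ⟨s20, s21, s22, s23⟩ := pvBisect_spec js (i + nwin) lo (js.length : Int) hs (by omega) s11 le_rfl
  set hi2 := _bisect_left js (i + nwin) lo (js.length : Int) with hhi2
  rw [PySem.List.slice_toNat _ (by omega) (by omega)]
  set sl := (js.drop lo.toNat).take (hi2.toNat - lo.toNat) with hsl
  have hsllen : sl.length = hi2.toNat - lo.toNat := by
    rw [hsl, List.length_take, List.length_drop]
    omega
  have hslget : ∀ idx : Nat, idx < sl.length →
      sl.getD idx 0 = js.getD (lo.toNat + idx) 0 := by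
    intro idx hidx
    have hidx' : idx < hi2.toNat - lo.toNat := by rw [← hsllen]; exact hidx
    rw [List.getD_eq_getElem _ _ hidx, List.getD_eq_getElem _ _ (by omega)]
    simp only [hsl, List.getElem_take, List.getElem_drop]
  constructor
  · intro j hj
    obtain ⟨idx, hidx, hjidx⟩ := List.getElem_of_mem hj
    have hjidx' : sl.getD idx 0 = j := by rw [List.getD_eq_getElem _ _ hidx, hjidx]
    rw [hslget idx hidx] at hjidx'
    have hidx' : idx < hi2.toNat - lo.toNat := by rw [← hsllen]; exact hidx
    have h1 : i ≤ js.getD (lo.toNat + idx) 0 := s13 (lo.toNat + idx) (by omega) (by omega)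
    have h2 : js.getD (lo.toNat + idx) 0 < i + nwin := s22 (lo.toNat + idx) (by omega) (by omega)
    omega
  · intro k hk
    have hjs : js.take lo.toNat ++ (sl ++ js.drop hi2.toNat) = js := by
      rw [hsl]
      have hdd : js.drop hi2.toNat = (js.drop lo.toNat).drop (hi2.toNat - lo.toNat) := by
        rw [List.drop_drop]
        congr 1
        omega
      rw [hdd, List.take_append_drop, List.take_append_drop]
    have hc1 : (js.take lo.toNat).count ((k : Int) + i) = 0 := by
      rw [List.count_eq_zero]
      intro hmem
      obtain ⟨idx, hidx, hjidx⟩ := List.getElem_of_mem hmem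
      rw [List.getElem_take] at hjidx
      have hlt : js.getD idx 0 < i := by
        apply s12 idx (by omega)
        simp only [List.length_take] at hidx
        omega
      rw [List.getD_eq_getElem _ _ (by simp at hidx; omega)] at hlt
      omega
    have hc2 : (js.drop hi2.toNat).count ((k : Int) + i) = 0 := by
      rw [List.count_eq_zero]
      intro hmem
      obtain ⟨idx, hidx, hjidx⟩ := List.getElem_of_mem hmem
      rw [List.getElem_drop] at hjidx
      simp only [List.length_drop] at hidx
      have hge : i + nwin ≤ js.getD (hi2.toNat + idx) 0 := s23 (hi2.toNat + idx) (by omega) (by omega)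
      rw [List.getD_eq_getElem _ _ (by omega)] at hge
      omega
    conv_rhs => rw [← hjs]
    rw [List.count_append, List.count_append, hc1, hc2]
    omega

-- outer scatter loop: one clipped inner loop per character of the uppercased target
theorem pvOuter2 (nwin : Int) (hnw : 0 < nwin) (pos : Char → List Int)
    (hsort : ∀ c, (pos c).Pairwise (· < ·)) (pairs : List (Int × Char))
    (sc : List Int) (hlen : (sc.length : Int) = nwin) :
    ((pairs.foldl (fun sc p =>
        (PySem.List.slice (pos p.2) (some (_bisect_left (pos p.2) p.1 0 ((pos p.2).length : Int)))
          (some (_bisect_left (pos p.2) (p.1 + nwin) (_bisect_left (pos p.2) p.1 0 ((pos p.2).length : Int)) ((pos p.2).length : Int)))).foldl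
          (fun sc j => PySem.List.pySetD sc (j - p.1) (PySem.List.pyGetD sc (j - p.1) 0 + 1)) sc) sc).length
       = sc.length)
    ∧ ∀ k : Nat, k < sc.length →
        (pairs.foldl (fun sc p =>
            (PySem.List.slice (pos p.2) (some (_bisect_left (pos p.2) p.1 0 ((pos p.2).length : Int)))
              (some (_bisect_left (pos p.2) (p.1 + nwin) (_bisect_left (pos p.2) p.1 0 ((pos p.2).length : Int)) ((pos p.2).length : Int)))).foldl
              (fun sc j => PySem.List.pySetD sc (j - p.1) (PySem.List.pyGetD sc (j - p.1) 0 + 1)) sc) sc).getD k 0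
          = sc.getD k 0 + ((pairs.map (fun p => ((pos p.2).count ((k : Int) + p.1) : Int))).sum) := by
  induction pairs generalizing sc with
  | nil => simp
  | cons p ps ih =>
    simp only [List.foldl_cons]
    obtain ⟨hband, hcount⟩ := pvClip (pos p.2) p.1 nwin (hsort p.2) hnw
    obtain ⟨hl1, he1⟩ := pvInner2 p.1 sc.length _ sc rfl (by rw [hlen]; exact hband)
    obtain ⟨ihl, ihe⟩ := ih _ (by rw [hl1]; exact hlen)
    refine ⟨by rw [ihl, hl1], ?_⟩
    intro k hk
    rw [ihe k (by omega), he1 k hk]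
    rw [hcount k (by omega)]
    simp only [List.map_cons, List.sum_cons]
    ring

-- each character's position list is strictly increasing
theorem pvPositions_sorted (sU : List Char) (c : Char) :
    (((PySem.List.enumerate sU).filter (fun p => p.2 == c)).map (fun x => x.1)).Pairwise (· < ·) := by
  rw [List.pairwise_map]
  exact (PySem.List.pairwise_lt_enumerate sU 0).filter _

-- generic first-strict-max scan: A carries the window itself, B carries its index
theorem pvScan (l : List Int) (f g : Int → Int) (r : Int → List Char)
    (hl : ∀ k ∈ l, 0 ≤ k) (hfg : ∀ k ∈ l, f k = g k)
    (mx : Int) (c : List Char) (bk : Int)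
    (hc : c = if bk < 0 then [] else r bk) :
    (l.foldl (fun st k => if f k > st.1 then (f k, r k) else st) (mx, c)).1
      = (l.foldl (fun st k => if g k > st.1 then (g k, k) else st) (mx, bk)).1
    ∧ (l.foldl (fun st k => if f k > st.1 then (f k, r k) else st) (mx, c)).2
      = (if (l.foldl (fun st k => if g k > st.1 then (g k, k) else st) (mx, bk)).2 < 0 then []
         else r (l.foldl (fun st k => if g k > st.1 then (g k, k) else st) (mx, bk)).2) := by
  induction l generalizing mx c bk with
  | nil => exact ⟨rfl, hc⟩
  | cons k l ih =>
    simp only [List.foldl_cons]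
    rw [hfg k List.mem_cons_self]
    by_cases hgt : g k > mx
    · rw [if_pos hgt, if_pos hgt]
      exact ih (fun x hx => hl x (List.mem_cons_of_mem _ hx))
        (fun x hx => hfg x (List.mem_cons_of_mem _ hx)) (g k) (r k) k
        (by rw [if_neg (by have := hl k List.mem_cons_self; omega)])
    · rw [if_neg hgt, if_neg hgt]
      exact ih (fun x hx => hl x (List.mem_cons_of_mem _ hx))
        (fun x hx => hfg x (List.mem_cons_of_mem _ hx)) mx c bk hc

theorem pvMain (tS sS : String) :
    find_best_substrand tS sS = find_best_substrand_alt tS sS := by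
  simp only [find_best_substrand, find_best_substrand_alt]
  by_cases hm : tS.toList.length = 0
  · simp [hm]
  · have hmb : (((tS.toList.length : Int)) == 0) = false := by rw [beq_eq_false_iff_ne]; exact_mod_cast hm
    simp only [hmb, Bool.false_eq_true, if_false]
    by_cases hw : ((PySem.Chars.upper sS.toList).length : Int) - (tS.toList.length : Int) + 1 ≤ 0
    · have hw' : ((sS.toList.length : Int)) - (tS.toList.length : Int) + 1 ≤ 0 := by
        simpa [PySem.Chars.upper] using hw
      rw [if_pos hw]
      rw [PySem.List.pyRange_one_eq_nil hw']
      simp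
    · rw [if_neg hw]
      set tR := tS.toList with htR
      set sR := sS.toList with hsR
      set sU := PySem.Chars.upper sR with hsU
      set tU := PySem.Chars.upper tR with htU
      have hsulen : sU.length = sR.length := by rw [hsU]; simp [PySem.Chars.upper]
      have htulen : tU.length = tR.length := by rw [htU]; simp [PySem.Chars.upper]
      set nwin : Int := (sU.length : Int) - (tR.length : Int) + 1 with hnwin
      set w : Nat := nwin.toNat with hwdef
      have hwpos : 0 < nwin := by omega
      have hwcast : (w : Int) = nwin := by omega
      have hwn : w + tR.length = sR.length + 1 := by omega
      set positions := (PySem.List.enumerate sU).foldl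
          (fun d p => d.modify p.2 [] fun l => l ++ [p.1]) PySem.Dict.empty with hposi
      set score := List.foldl
          (fun sc p =>
            (PySem.List.slice (positions.getD p.2 []) (some (_bisect_left (positions.getD p.2 []) p.1 0 ((positions.getD p.2 []).length : Int)))
              (some (_bisect_left (positions.getD p.2 []) (p.1 + nwin) (_bisect_left (positions.getD p.2 []) p.1 0 ((positions.getD p.2 []).length : Int)) ((positions.getD p.2 []).length : Int)))).foldl
              (fun sc j => PySem.List.pySetD sc (j - p.1) (PySem.List.pyGetD sc (j - p.1) 0 + 1)) sc)
          (List.replicate w (0 : Int)) (PySem.List.enumerate tU) with hscoredef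
      -- score array characterisation
      have hsortpos : ∀ c, ((positions.getD c []).Pairwise (· < ·)) := by
        intro c
        rw [hposi, pvPositions_getD]
        exact pvPositions_sorted sU c
      have hOuter := pvOuter2 nwin hwpos (fun c => positions.getD c []) hsortpos
        (PySem.List.enumerate tU) (List.replicate w (0 : Int)) (by simp [hwcast])
      simp only [List.length_replicate] at hOuter
      have hentry : ∀ k : Nat, k < w → score.getD k 0 =
          ((List.range tR.length).countP
            (fun i => PySem.Chars.upperChar (tR.getD i ' ')
                   == PySem.Chars.upperChar (sR.getD (k + i) ' ')) : Int) := by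
        intro k hk
        rw [hscoredef]
        have h2 := hOuter.2 k hk
        simp only [] at h2
        rw [h2, List.getD_replicate 0 hk]
        rw [PySem.List.enumerate_eq_map_pyRange tU ' ', List.map_map]
        simp only [PySem.List.len_eq]
        rw [PySem.List.pyRange_zero_nat, List.map_map]
        simp only [Function.comp_def]
        have hcg : ∀ i ∈ List.range tU.length,
            ((positions.getD (PySem.List.pyGetD tU ((i : Nat) : Int) ' ') []).count ((k : Int) + ((i : Nat) : Int)) : Int)
              = (fun i : Nat => if sU.getD (k + i) ' ' == tU.getD i ' ' then (1 : Int) else 0) i := by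
          intro i hi
          rw [List.mem_range] at hi
          simp only [PySem.List.pyGetD_natCast]
          rw [hposi, pvPositions_getD]
          have hcast : (k : Int) + (i : Int) = ((k + i : Nat) : Int) := by push_cast; ring
          rw [hcast, pvPositions_count sU _ (k + i) (by omega)]
          split_ifs <;> simp
        rw [List.map_congr_left hcg, PySem.List.sum_map_ite_one_zero]
        rw [htulen] at *
        have hcp : ∀ i ∈ List.range tR.length,
            (sU.getD (k + i) ' ' == tU.getD i ' ') = true
              ↔ (PySem.Chars.upperChar (tR.getD i ' ')
                   == PySem.Chars.upperChar (sR.getD (k + i) ' ')) = true := by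
          intro i hi
          rw [List.mem_range] at hi
          rw [hsU, htU, pvUpper_getD sR (k + i) (by omega), pvUpper_getD tR i (by omega), Bool.beq_comm]
        rw [List.countP_congr hcp]
        simp
      -- the scan: instantiate pvScan
      rw [show ((sR.length : Int) - (tR.length : Int) + 1) = nwin by omega]
      have hScan := pvScan (PySem.List.pyRange 0 nwin 1)
        (fun k => search_sequence tR (PySem.Chars.upper (PySem.List.slice sR (some k) (some (k + (tR.length : Int))))))
        (fun k => PySem.List.pyGetD score k 0)
        (fun k => PySem.Chars.upper (PySem.List.slice sR (some k) (some (k + (tR.length : Int)))))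
        (fun k hk => ((PySem.List.mem_pyRange_one).mp hk).1)
        ?_ 0 [] (-1) (by norm_num)
      · simp only [] at hScan
        rw [hScan.2]
        by_cases hneg : (List.foldl
            (fun st k => if PySem.List.pyGetD score k 0 > st.1 then (PySem.List.pyGetD score k 0, k) else st)
            (0, -1) (PySem.List.pyRange 0 nwin 1)).2 < 0
        · rw [if_pos hneg, if_pos hneg]
        · rw [if_neg hneg, if_neg hneg, pvUpper_slice]
      · -- pointwise agreement of the two score functions on the window range
        intro k hk
        obtain ⟨hk0, hklt⟩ := (PySem.List.mem_pyRange_one).mp hk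
        set kN := k.toNat with hkN
        have hkk : k = (kN : Int) := by omega
        have hkw : kN < w := by omega
        rw [hkk]
        simp only [PySem.List.pyGetD_natCast]
        rw [List.getD_eq_getElem?_getD, ← List.getD_eq_getElem?_getD, hentry kN hkw]
        rw [pvSearch_eq_countP]
        have hcw : ∀ i ∈ List.range tR.length,
            (PySem.Chars.upperChar (tR.getD i ' ')
              == PySem.Chars.upperChar ((PySem.Chars.upper (PySem.List.slice sR (some ((kN : Nat) : Int)) (some (((kN : Nat) : Int) + (tR.length : Int))))).getD i ' ')) = true
              ↔ (PySem.Chars.upperChar (tR.getD i ' ')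
              == PySem.Chars.upperChar (sR.getD (kN + i) ' ')) = true := by
          intro i hi
          rw [List.mem_range] at hi
          rw [pvWindow_getD sR kN i tR.length hi (by omega), pvUpperChar_idem]
        rw [List.countP_congr hcw]

-- ===== VERDICT (by name: the statement is the Claim_ definition above) =====
theorem find_best_substrand_spec : Claim_equal_find_best_substrand := by
  intro dna_to_match dna_to_search _
  unfold Spec_find_best_substrand
  exact pvMain dna_to_match dna_to_search
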